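-- pv_equiv track=rewrite | github.com/dindapw/mekarde | mekarde/module/etl_file.py | transform_column_name
-- ===== SOURCE A (Python) =====
-- def transform_column_name(columns):
--     new_columns = []
--     for each in columns:
--         new_each = each.lower().replace(' ', '_')
--         new_each = new_each.replace('-', '_')
--         new_each = new_each.replace('.', '_')
--         new_columns.append(new_each)
--     return new_columns
-- ===== SOURCE B (Python) =====
-- def _clean(ch):
--     # one fused per-character step: lowercase ASCII letters arithmetically,
--     # map the separators to '_', leave everything else alone
--     if 'A' <= ch <= 'Z':
--         return chr(ord(ch) + 32)
--     if ch in ' -.':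
--         return '_'
--     return ch
--
--
-- def transform_column_name(columns):
--     return [''.join(map(_clean, each)) for each in columns]
-- ===== Notes on version B (the rewrite author's own statement) =====
-- stated objective: alternative
-- what changed: Instead of A's four staged whole-string passes (.lower() then three .replace scans), B makes a single fused per-character pass: one function classifies each character (arithmetic ASCII lowercasing, separator to '_', else identity) and the string is rebuilt once with ''.join(map(...)).
import Mathlib
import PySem

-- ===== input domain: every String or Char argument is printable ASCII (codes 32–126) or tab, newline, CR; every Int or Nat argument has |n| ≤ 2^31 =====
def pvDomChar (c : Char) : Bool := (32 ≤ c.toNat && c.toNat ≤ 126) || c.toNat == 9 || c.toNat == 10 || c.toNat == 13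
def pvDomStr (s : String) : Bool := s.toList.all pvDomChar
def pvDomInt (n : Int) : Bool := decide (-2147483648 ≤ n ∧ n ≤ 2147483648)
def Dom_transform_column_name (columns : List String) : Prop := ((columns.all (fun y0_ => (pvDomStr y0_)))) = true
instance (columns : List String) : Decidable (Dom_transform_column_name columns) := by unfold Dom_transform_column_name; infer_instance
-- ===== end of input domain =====

-- B replaces A's four staged whole-string passes (.lower() then three .replace scans) by ONE fused
-- per-character pass: a classifier lowercases ASCII letters arithmetically, maps ' '/'-'/'.' to '_'
-- and keeps everything else, and the string is rebuilt once (objective: alternative).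
-- ===== PORT A =====
def transform_column_name (columns : List String) : List String :=
  columns.foldl
    (fun new_columns each =>
      let new_each := PySem.Str.replace (PySem.Str.lower each) " " "_"
      let new_each := PySem.Str.replace new_each "-" "_"
      let new_each := PySem.Str.replace new_each "." "_"
      new_columns ++ [new_each])
    []

-- ===== PORT B =====
-- Source B's _clean: lowercase A–Z arithmetically, separators to '_', otherwise identity
def pvClean (c : Char) : Char :=
  if 'A' ≤ c ∧ c ≤ 'Z' then Char.ofNat (c.toNat + 32)
  else if c = ' ' ∨ c = '-' ∨ c = '.' then '_' else c

def transform_column_name_alt (columns : List String) : List String :=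
  columns.map (fun each => String.ofList (each.toList.map pvClean))

-- ===== PRECONDITION & SPEC =====
def Spec_transform_column_name (columns : List String) (out : List String) : Prop := out = transform_column_name_alt columns
instance (columns : List String) (out : List String) : Decidable (Spec_transform_column_name columns out) := by unfold Spec_transform_column_name; infer_instance

-- ===== CLAIM (what is proved, stated in full; the proofs are below) =====
def Claim_equal_transform_column_name : Prop := ∀ (columns : List String), Dom_transform_column_name columns → Spec_transform_column_name columns (transform_column_name columns)

-- ===== LEMMAS AND PROOFS =====

-- replace.go for a single-char pattern is a pointwise map
theorem go_single (a b : Char) (l : List Char) (fuel : Nat) (acc : List Char)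
    (h : l.length ≤ fuel) :
    PySem.Chars.replace.go [a] [b] fuel l acc
      = acc.reverse ++ l.map (fun c => if c = a then b else c) := by
  induction l generalizing fuel acc with
  | nil =>
    cases fuel <;> simp [PySem.Chars.replace.go]
  | cons c t ih =>
    cases fuel with
    | zero => simp at h
    | succ n =>
      simp only [PySem.Chars.replace.go]
      by_cases hc : c = a
      · subst hc
        have hp : List.isPrefixOf [c] (c :: t) = true := by
          simp [List.isPrefixOf]
        rw [if_pos hp]
        have hd : List.drop [c].length (c :: t) = t := rfl
        rw [hd, ih _ _ (by simpa using h)]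
        simp
      · have hp : List.isPrefixOf [a] (c :: t) = false := by
          simp [List.isPrefixOf]
          intro hh; exact absurd hh.symm hc
        rw [if_neg (by simp [hp])]
        rw [ih _ _ (by simpa using Nat.le_of_succ_le_succ h)]
        simp [hc]

-- replacing a single char by a single char is List.map of a pointwise substitution
theorem replace_single (a b : Char) (l : List Char) :
    PySem.Chars.replace l [a] [b] = l.map (fun c => if c = a then b else c) := by
  rw [PySem.Chars.replace, if_neg (by simp)]
  simpa using go_single a b l l.length [] (le_refl _)

-- per character: lowering then the three substitutions equals B's single classifier
theorem clean_eq (c : Char) :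
    (if (if (if PySem.Chars.lowerChar c = ' ' then '_' else PySem.Chars.lowerChar c) = '-'
          then '_' else (if PySem.Chars.lowerChar c = ' ' then '_' else PySem.Chars.lowerChar c)) = '.'
        then '_'
        else (if (if PySem.Chars.lowerChar c = ' ' then '_' else PySem.Chars.lowerChar c) = '-'
          then '_' else (if PySem.Chars.lowerChar c = ' ' then '_' else PySem.Chars.lowerChar c)))
      = pvClean c := by
  unfold pvClean PySem.Chars.lowerChar PySem.Chars.isupper
  by_cases hu : 'A' ≤ c ∧ c ≤ 'Z'
  · obtain ⟨h1, h2⟩ := hu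
    have hn1 : 65 ≤ c.toNat := by
      have := Char.le_def.mp h1
      simpa [UInt32.le_iff_toNat_le] using this
    have hn2 : c.toNat ≤ 90 := by
      have := Char.le_def.mp h2
      simpa [UInt32.le_iff_toNat_le] using this
    have ht : (Char.ofNat (c.toNat + 32)).toNat = c.toNat + 32 := by
      have hv : Nat.isValidChar (c.toNat + 32) := Or.inl (by omega)
      rw [Char.ofNat, dif_pos hv]; rfl
    have hne : ∀ d : Char, (Char.ofNat (c.toNat + 32)).toNat ≠ d.toNat →
        Char.ofNat (c.toNat + 32) ≠ d := by
      intro d hd h; exact hd (congrArg Char.toNat h)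
    have e32 : Char.toNat ' ' = 32 := rfl
    have e45 : Char.toNat '-' = 45 := rfl
    have e46 : Char.toNat '.' = 46 := rfl
    have hb : (decide ('A' ≤ c) && decide (c ≤ 'Z')) = true := by simp [h1, h2]
    rw [hb, if_pos rfl,
        if_neg (hne ' ' (by rw [ht, e32]; omega)),
        if_neg (hne '-' (by rw [ht, e45]; omega)),
        if_neg (hne '.' (by rw [ht, e46]; omega)),
        if_pos ⟨h1, h2⟩]
  · have hb : (decide ('A' ≤ c) && decide (c ≤ 'Z')) = false := by
      rcases Decidable.not_and_iff_not_or_not.mp hu with h | h <;> simp [h]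
    rw [hb]
    simp only [Bool.false_eq_true, if_false, if_neg hu]
    by_cases e1 : c = ' ' <;> by_cases e2 : c = '-' <;> by_cases e3 : c = '.' <;> simp_all

-- one column: A's lower + three chained replaces equal B's single fused pass
theorem elem_eq (each : String) :
    PySem.Str.replace (PySem.Str.replace (PySem.Str.replace (PySem.Str.lower each) " " "_") "-" "_") "." "_"
      = String.ofList (each.toList.map pvClean) := by
  apply String.ext
  simp only [PySem.Str.toList_replace, String.toList_ofList, PySem.Str.toList_lower]
  have h1 : " ".toList = [' '] := rfl
  have h2 : "-".toList = ['-'] := rfl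
  have h3 : ".".toList = ['.'] := rfl
  have h4 : "_".toList = ['_'] := rfl
  rw [h1, h2, h3, h4, replace_single, replace_single, replace_single,
    PySem.Chars.lower, List.map_map, List.map_map, List.map_map]
  apply List.map_congr_left
  intro c _
  simpa only [Function.comp] using clean_eq c

-- A's append-accumulator loop is List.map
theorem foldl_append_map (f : String → String) (l : List String) (acc : List String) :
    l.foldl (fun r x => r ++ [f x]) acc = acc ++ l.map f := by
  induction l generalizing acc with
  | nil => simp
  | cons x t ih => simp [List.foldl, ih]

-- ===== VERDICT (by name: the statement is the Claim_ definition above) =====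
theorem transform_column_name_spec : Claim_equal_transform_column_name := by
  intro columns _
  unfold Spec_transform_column_name transform_column_name transform_column_name_alt
  rw [foldl_append_map
    (fun each => PySem.Str.replace (PySem.Str.replace (PySem.Str.replace (PySem.Str.lower each) " " "_") "-" "_") "." "_")]
  simp only [List.nil_append]
  exact List.map_congr_left (fun each _ => elem_eq each)
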